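-- pv_equiv track=rewrite | github.com/yutounun/Python-Algorythm-Udemy | HashTable/item_in_common.py | item_in_common
-- ===== SOURCE A (Python) =====
-- def item_in_common(l1, l2):
--     dict = {}
--     # {1: True, 3: True, 5: True}
--     for val in l1:
--         dict[val] = True
--
--     for val in l2:
--         if val in dict:
--             return True
--     return False
-- ===== SOURCE B (Python) =====
-- def item_in_common(l1, l2):
--     a = sorted(l1)
--     b = sorted(l2)
--     i = 0
--     j = 0
--     while i < len(a) and j < len(b):
--         if a[i] == b[j]:
--             return True
--         if a[i] < b[j]:
--             i += 1
--         else: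
--             j += 1
--     return False
-- ===== Notes on version B (the rewrite author's own statement) =====
-- stated objective: alternative
-- what changed: Replaces the hash-table build plus membership loop with a sort-then-merge two-pointer scan: both lists are sorted and walked in lockstep, advancing the pointer at the smaller element until an equal pair is found.
import Mathlib
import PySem

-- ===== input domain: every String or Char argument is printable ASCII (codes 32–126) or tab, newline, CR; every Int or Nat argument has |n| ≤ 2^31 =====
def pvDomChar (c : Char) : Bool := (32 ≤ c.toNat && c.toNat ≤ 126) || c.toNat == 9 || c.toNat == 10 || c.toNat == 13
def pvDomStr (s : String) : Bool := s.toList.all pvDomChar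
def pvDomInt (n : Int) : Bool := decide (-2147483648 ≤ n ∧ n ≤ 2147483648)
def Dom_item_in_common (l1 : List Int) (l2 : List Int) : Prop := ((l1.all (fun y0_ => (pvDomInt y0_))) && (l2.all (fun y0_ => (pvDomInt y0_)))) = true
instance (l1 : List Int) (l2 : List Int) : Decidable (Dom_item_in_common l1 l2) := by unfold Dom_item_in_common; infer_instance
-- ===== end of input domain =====

-- B replaces the hash-table build plus membership loop with a sort-then-merge two-pointer scan (alternative algorithm, not faster).
-- ===== PORT A =====
def itemInCommonLoop (d : PySem.Dict Int Bool) : List Int → Bool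
  | [] => false
  | v :: rest => if d.contains v then true else itemInCommonLoop d rest

def item_in_common (l1 : List Int) (l2 : List Int) : Bool :=
  let d := l1.foldl (fun d v => d.insert v true) (PySem.Dict.empty : PySem.Dict Int Bool)
  itemInCommonLoop d l2

-- ===== PORT B =====
-- the two-pointer while loop of Source B: advance in whichever sorted list holds the smaller head
def mergeCommon : List Int → List Int → Bool
  | [], _ => false
  | _ :: _, [] => false
  | x :: xs, y :: ys =>
      if x == y then true
      else if x < y then mergeCommon xs (y :: ys)
      else mergeCommon (x :: xs) ys

def item_in_common_alt (l1 : List Int) (l2 : List Int) : Bool :=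
  mergeCommon (PySem.List.sorted l1 (fun x => x) false) (PySem.List.sorted l2 (fun x => x) false)

-- ===== PRECONDITION & SPEC =====
def Spec_item_in_common (l1 : List Int) (l2 : List Int) (out : Bool) : Prop := out = item_in_common_alt l1 l2
instance (l1 : List Int) (l2 : List Int) (out : Bool) : Decidable (Spec_item_in_common l1 l2 out) := by unfold Spec_item_in_common; infer_instance

-- ===== CLAIM (what is proved, stated in full; the proofs are below) =====
def Claim_equal_item_in_common : Prop := ∀ (l1 : List Int) (l2 : List Int), Dom_item_in_common l1 l2 → Spec_item_in_common l1 l2 (item_in_common l1 l2)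

-- ===== LEMMAS AND PROOFS =====
lemma loop_eq_any (d : PySem.Dict Int Bool) (l : List Int) :
    itemInCommonLoop d l = l.any (fun v => d.contains v) := by
  induction l with
  | nil => rfl
  | cons v rest ih => cases h : d.contains v <;> simp [itemInCommonLoop, h, ih]

-- on sorted inputs, the merge scan decides whether the lists share an element
lemma mergeCommon_iff (a b : List Int)
    (ha : a.Pairwise (· ≤ ·)) (hb : b.Pairwise (· ≤ ·)) :
    mergeCommon a b = true ↔ ∃ x, x ∈ a ∧ x ∈ b := by
  induction a generalizing b with
  | nil => simp [mergeCommon]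
  | cons x xs iha =>
    induction b with
    | nil => simp [mergeCommon]
    | cons y ys ihb =>
      rcases List.pairwise_cons.1 ha with ⟨hxle, ha'⟩
      rcases List.pairwise_cons.1 hb with ⟨hyle, hb'⟩
      by_cases hxy : x = y
      · subst hxy
        simp [mergeCommon]
      · by_cases hlt : x < y
        · rw [show mergeCommon (x :: xs) (y :: ys) = mergeCommon xs (y :: ys) by
            simp [mergeCommon, hxy, hlt]]
          rw [iha (y :: ys) ha' hb]
          constructor
          · rintro ⟨z, hz1, hz2⟩; exact ⟨z, List.mem_cons_of_mem _ hz1, hz2⟩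
          · rintro ⟨z, hz1, hz2⟩
            rcases List.mem_cons.1 hz1 with rfl | hz1'
            · rcases List.mem_cons.1 hz2 with rfl | hz2'
              · exact absurd rfl hxy
              · exact absurd (lt_of_le_of_lt (hyle _ hz2') hlt) (lt_irrefl _)
            · exact ⟨z, hz1', hz2⟩
        · have hyx : y < x := lt_of_le_of_ne (not_lt.1 hlt) (Ne.symm hxy)
          rw [show mergeCommon (x :: xs) (y :: ys) = mergeCommon (x :: xs) ys by
            simp [mergeCommon, hxy, hlt]]
          rw [ihb hb']
          constructor
          · rintro ⟨z, hz1, hz2⟩; exact ⟨z, hz1, List.mem_cons_of_mem _ hz2⟩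
          · rintro ⟨z, hz1, hz2⟩
            rcases List.mem_cons.1 hz2 with rfl | hz2'
            · rcases List.mem_cons.1 hz1 with rfl | hz1'
              · exact absurd rfl hxy
              · exact absurd (lt_of_le_of_lt (hxle _ hz1') hyx) (lt_irrefl _)
            · exact ⟨z, hz1, hz2'⟩

-- ===== VERDICT (by name: the statement is the Claim_ definition above) =====
theorem item_in_common_spec : Claim_equal_item_in_common := by
  intro l1 l2 _
  unfold Spec_item_in_common item_in_common item_in_common_alt
  rw [loop_eq_any, Bool.eq_iff_iff]
  have hk : ∀ v : Int,
      ((l1.foldl (fun d v => d.insert v true) (PySem.Dict.empty : PySem.Dict Int Bool)).contains v = true)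
        ↔ v ∈ l1 := by
    intro v
    rw [PySem.Dict.contains_iff_mem_keys, PySem.Dict.keys_foldl_insert]
    simp [PySem.Set.mem_update, PySem.Dict.keys_empty]
  rw [mergeCommon_iff _ _ (PySem.List.sorted_pairwise l1 (fun x => x))
      (PySem.List.sorted_pairwise l2 (fun x => x))]
  simp only [PySem.List.mem_sorted, List.any_eq_true, hk]
  constructor
  · rintro ⟨v, hv2, hv1⟩; exact ⟨v, hv1, hv2⟩
  · rintro ⟨v, hv1, hv2⟩; exact ⟨v, hv2, hv1⟩
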